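-- pv_equiv track=rewrite | github.com/ethan183/au-addr-parser | au_address_parser/addr_parser.py | _deal_street_suffix
-- ===== SOURCE A (Python) =====
-- def _deal_street_suffix(street_name_list, street_name_dict):
--     street_suffix_dict = {'WEST': 'W', 'EAST': 'E', 'NORTH': 'N', 'SOUTH': 'S', 'NORTHEAST': 'NE',
--                           'SOUTHEAST': 'SE', 'NORTHWEST': 'NW', 'SOUTHWEST': 'SW'}
--     if street_name_list[-1] in street_suffix_dict.keys():
--         street_name_dict['street_suffix'] = street_name_list[-1]
--         street_name_dict['street_suffix_abbr'] = street_suffix_dict[street_name_dict['street_suffix']]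
--         street_name_list = street_name_list[:-1]
--     elif street_name_list[-1] in street_suffix_dict.values():
--         street_name_dict['street_suffix_abbr'] = street_name_list[-1]
--         for k, v in street_suffix_dict.items():
--             if street_name_list[-1] == v:
--                 street_name_dict['street_suffix'] = k
--                 break
--         street_name_list = street_name_list[:-1]
--     return street_name_list, street_name_dict
-- ===== SOURCE B (Python) =====
-- _EXP = {'N': 'NORTH', 'S': 'SOUTH', 'E': 'EAST', 'W': 'WEST'}
--
--
-- def _abbr_of_full(tok):
--     """Abbreviation of tok if it is a full compass name, else None.
--
--     A full name is NORTH or SOUTH, optionally followed by EAST or WEST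
--     (NORTH/SOUTH are both 5 letters), or a bare EAST/WEST; the
--     abbreviation is the initial of each component word.
--     """
--     if tok == 'NORTH':
--         return 'N'
--     if tok == 'SOUTH':
--         return 'S'
--     if tok.startswith('NORTH') or tok.startswith('SOUTH'):
--         rest = tok[5:]
--         if rest == 'EAST':
--             return tok[:1] + 'E'
--         if rest == 'WEST':
--             return tok[:1] + 'W'
--         return None
--     if tok == 'EAST':
--         return 'E'
--     if tok == 'WEST':
--         return 'W'
--     return None
--
--
-- def _full_of_abbr(tok):
--     """Expansion of tok if it is a compass abbreviation, else None:
--     a single compass letter, or an N/S letter followed by an E/W letter."""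
--     if len(tok) == 1:
--         return _EXP.get(tok)
--     if len(tok) == 2 and tok[:1] in ('N', 'S') and tok[1:] in ('E', 'W'):
--         return _EXP[tok[:1]] + _EXP[tok[1:]]
--     return None
--
--
-- def _deal_street_suffix(street_name_list, street_name_dict):
--     last = street_name_list[-1]
--     abbr = _abbr_of_full(last)
--     if abbr is not None:
--         street_name_dict['street_suffix'] = last
--         street_name_dict['street_suffix_abbr'] = abbr
--         street_name_list = street_name_list[:-1]
--     else:
--         full = _full_of_abbr(last)
--         if full is not None:
--             street_name_dict['street_suffix_abbr'] = last
--             street_name_dict['street_suffix'] = full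
--             street_name_list = street_name_list[:-1]
--     return street_name_list, street_name_dict
-- ===== Notes on version B (the rewrite author's own statement) =====
-- stated objective: alternative
-- what changed: A looks the last token up in a fixed name->abbreviation table (keys membership, then values membership with a reverse-scan loop); B keeps no suffix table at all and instead parses the token morphologically: a full compass name is NORTH|SOUTH optionally followed by EAST|WEST (abbreviation = the component initials), and an abbreviation is one compass letter or an N/S letter followed by an E/W letter (expanded letter by letter).
-- outside the precondition, e.g. on _deal_street_suffix([], {}): A raises IndexError, B raises IndexError
import Mathlib
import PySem

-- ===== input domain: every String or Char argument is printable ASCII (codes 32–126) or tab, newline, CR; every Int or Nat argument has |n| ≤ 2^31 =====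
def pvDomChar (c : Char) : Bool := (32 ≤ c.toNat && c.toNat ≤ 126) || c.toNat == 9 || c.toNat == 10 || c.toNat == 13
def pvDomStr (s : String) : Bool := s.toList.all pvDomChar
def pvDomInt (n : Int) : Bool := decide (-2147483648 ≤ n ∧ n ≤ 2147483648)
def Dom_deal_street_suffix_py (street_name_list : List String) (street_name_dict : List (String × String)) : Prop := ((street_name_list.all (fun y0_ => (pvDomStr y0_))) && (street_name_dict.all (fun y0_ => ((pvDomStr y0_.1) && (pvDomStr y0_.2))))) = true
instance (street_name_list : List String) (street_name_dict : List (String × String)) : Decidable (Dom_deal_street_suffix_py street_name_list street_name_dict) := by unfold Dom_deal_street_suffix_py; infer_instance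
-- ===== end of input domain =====

-- B replaces A's fixed name↔abbreviation table (membership tests plus a reverse-scan loop)
-- by morphological parsing of the token itself: the compass words and their abbreviations are
-- built from the four direction letters/words, so B recognises and converts the last token by
-- string structure, with no suffix table at all; objective: alternative. The Python mutates
-- street_name_dict in place in both A and B; the equivalence proved is about the return value.

-- ===== PORT A =====
-- the literal suffix dict of A
def pvSuffixPairs : List (String × String) :=
  [("WEST", "W"), ("EAST", "E"), ("NORTH", "N"), ("SOUTH", "S"),
   ("NORTHEAST", "NE"), ("SOUTHEAST", "SE"), ("NORTHWEST", "NW"), ("SOUTHWEST", "SW")]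

-- Python's d[k] = v on a dict represented as its items list (overwrite keeps position)
def pvDictSet (d : List (String × String)) (k v : String) : List (String × String) :=
  ((PySem.Dict.mk d).insert k v).items

-- A's 'for k, v in street_suffix_dict.items(): if … : …; break' loop
def pvScanLoop (last : String) (d : List (String × String)) :
    List (String × String) → List (String × String)
  | [] => d
  | (k, v) :: rest => if last == v then pvDictSet d "street_suffix" k else pvScanLoop last d rest

def deal_street_suffix_py (street_name_list : List String)
    (street_name_dict : List (String × String)) :
    List String × (List (String × String)) :=
  let sd := pvSuffixPairs
  match PySem.List.pyGet? street_name_list (-1) with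
  | none => (street_name_list, street_name_dict)  -- IndexError in Python; excluded by Pre_
  | some last =>
    if ((PySem.Dict.mk sd).keys).contains last then
      let d1 := pvDictSet street_name_dict "street_suffix" last
      let s := ((PySem.Dict.mk d1).get? "street_suffix").getD ""
      let v := ((PySem.Dict.mk sd).get? s).getD ""   -- KeyError impossible: s is a key of sd
      let d2 := pvDictSet d1 "street_suffix_abbr" v
      (PySem.List.slice street_name_list none (some (-1)), d2)
    else if ((PySem.Dict.mk sd).values).contains last then
      let d1 := pvDictSet street_name_dict "street_suffix_abbr" last
      let d2 := pvScanLoop last d1 sd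
      (PySem.List.slice street_name_list none (some (-1)), d2)
    else (street_name_list, street_name_dict)

-- ===== PORT B =====
-- B's letter table _EXP
def pvEXP : PySem.Dict String String :=
  PySem.Dict.mk [("N", "NORTH"), ("S", "SOUTH"), ("E", "EAST"), ("W", "WEST")]

-- B's _abbr_of_full: parse tok as NORTH|SOUTH [EAST|WEST] or bare EAST|WEST, abbr = initials
def pvAbbrOfFull (tok : String) : Option String :=
  if tok == "NORTH" then some "N"
  else if tok == "SOUTH" then some "S"
  else if PySem.Str.startswith tok "NORTH" || PySem.Str.startswith tok "SOUTH" then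
    let rest := PySem.Str.slice tok (some 5) none        -- tok[5:]
    if rest == "EAST" then some (PySem.Str.slice tok none (some 1) ++ "E")   -- tok[:1] + 'E'
    else if rest == "WEST" then some (PySem.Str.slice tok none (some 1) ++ "W")
    else none
  else if tok == "EAST" then some "E"
  else if tok == "WEST" then some "W"
  else none

-- B's _full_of_abbr: a single compass letter, or an N/S letter followed by an E/W letter
def pvFullOfAbbr (tok : String) : Option String :=
  if PySem.Str.len tok == 1 then pvEXP.get? tok
  else if PySem.Str.len tok == 2
      && (PySem.Str.slice tok none (some 1) == "N" || PySem.Str.slice tok none (some 1) == "S")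
      && (PySem.Str.slice tok (some 1) none == "E" || PySem.Str.slice tok (some 1) none == "W") then
    -- _EXP[...]: KeyError impossible in this branch, both slices are keys of _EXP
    some (pvEXP.getD (PySem.Str.slice tok none (some 1)) "" ++
          pvEXP.getD (PySem.Str.slice tok (some 1) none) "")
  else none

def deal_street_suffix_py_alt (street_name_list : List String)
    (street_name_dict : List (String × String)) :
    List String × (List (String × String)) :=
  match PySem.List.pyGet? street_name_list (-1) with
  | none => (street_name_list, street_name_dict)  -- IndexError in Python; excluded by Pre_
  | some last =>
    match pvAbbrOfFull last with
    | some abbr =>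
        let d1 := pvDictSet street_name_dict "street_suffix" last
        let d2 := pvDictSet d1 "street_suffix_abbr" abbr
        (PySem.List.slice street_name_list none (some (-1)), d2)
    | none =>
      match pvFullOfAbbr last with
      | some full =>
          let d1 := pvDictSet street_name_dict "street_suffix_abbr" last
          let d2 := pvDictSet d1 "street_suffix" full
          (PySem.List.slice street_name_list none (some (-1)), d2)
      | none => (street_name_list, street_name_dict)

-- ===== PRECONDITION & SPEC =====
-- Pre_ excludes only the empty token list, on which A (and B) raise IndexError at street_name_list[-1].
def Pre_deal_street_suffix_py (street_name_list : List String)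
    (street_name_dict : List (String × String)) : Prop :=
  street_name_list ≠ []
instance (street_name_list : List String) (street_name_dict : List (String × String)) :
    Decidable (Pre_deal_street_suffix_py street_name_list street_name_dict) := by
  unfold Pre_deal_street_suffix_py; infer_instance

def pvWitness_deal_street_suffix_py : List String × (List (String × String)) :=
  (["MAIN", "NORTH"], [("street_name", "MAIN")])

def Spec_deal_street_suffix_py (street_name_list : List String)
    (street_name_dict : List (String × String))
    (out : List String × (List (String × String))) : Prop :=
  out = deal_street_suffix_py_alt street_name_list street_name_dict
instance (street_name_list : List String) (street_name_dict : List (String × String))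
    (out : List String × (List (String × String))) :
    Decidable (Spec_deal_street_suffix_py street_name_list street_name_dict out) := by
  unfold Spec_deal_street_suffix_py; infer_instance

-- ===== CLAIM (what is proved, stated in full; the proofs are below) =====
def Claim_equal_deal_street_suffix_py : Prop :=
  ∀ (street_name_list : List String) (street_name_dict : List (String × String)),
    Dom_deal_street_suffix_py street_name_list street_name_dict →
    Pre_deal_street_suffix_py street_name_list street_name_dict →
    Spec_deal_street_suffix_py street_name_list street_name_dict
      (deal_street_suffix_py street_name_list street_name_dict)

-- ===== LEMMAS AND PROOFS =====

lemma pv_get_set (d : List (String × String)) (k v : String) :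
    (PySem.Dict.mk (pvDictSet d k v)).get? k = some v := by
  exact PySem.Dict.get?_insert_self ..

-- tok[5:] and tok[:1] as list facts
lemma pv_slice5 (s : String) : (PySem.Str.slice s (some 5) none).toList = s.toList.drop 5 := by
  simp [pysem]

lemma pv_slice1 (s : String) : (PySem.Str.slice s none (some 1)).toList = s.toList.take 1 := by
  simp [pysem]

-- B's full-name parser recognises nothing outside the eight compass names
lemma pv_abbr_none (tok : String)
    (h1 : tok ≠ "NORTH") (h2 : tok ≠ "SOUTH") (h3 : tok ≠ "EAST") (h4 : tok ≠ "WEST")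
    (h5 : tok ≠ "NORTHEAST") (h6 : tok ≠ "NORTHWEST")
    (h7 : tok ≠ "SOUTHEAST") (h8 : tok ≠ "SOUTHWEST") :
    pvAbbrOfFull tok = none := by
  have key : ∀ (r : List Char),
      (PySem.Str.startswith tok "NORTH" || PySem.Str.startswith tok "SOUTH") = true →
      tok.toList.drop 5 = r →
      (tok.toList = "NORTH".toList ++ r ∨ tok.toList = "SOUTH".toList ++ r) := by
    intro r hc hr
    rcases Bool.or_eq_true_iff.mp hc with hp | hp
    · left
      obtain ⟨t, ht⟩ := (PySem.Chars.startswith_iff _ _).mp (by simpa using hp)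
      rw [← hr, ← ht]; rfl
    · right
      obtain ⟨t, ht⟩ := (PySem.Chars.startswith_iff _ _).mp (by simpa using hp)
      rw [← hr, ← ht]; rfl
  unfold pvAbbrOfFull
  split_ifs with c1 c2 c3 c4 c5
  · exact absurd (by simpa using c1) h1
  · exact absurd (by simpa using c2) h2
  · -- startswith NORTH/SOUTH branch: tok[5:] decides EAST / WEST / neither
    dsimp only
    split_ifs with d1 d2
    · exfalso
      have hr : tok.toList.drop 5 = "EAST".toList := by
        have := congrArg String.toList (beq_iff_eq.mp d1)
        rwa [pv_slice5] at this
      rcases key _ c3 hr with ht | ht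
      · exact h5 (String.toList_inj.mp ht)
      · exact h7 (String.toList_inj.mp ht)
    · exfalso
      have hr : tok.toList.drop 5 = "WEST".toList := by
        have := congrArg String.toList (beq_iff_eq.mp d2)
        rwa [pv_slice5] at this
      rcases key _ c3 hr with ht | ht
      · exact h6 (String.toList_inj.mp ht)
      · exact h8 (String.toList_inj.mp ht)
    · rfl
  · exact absurd (by simpa using c4) h3
  · exact absurd (by simpa using c5) h4
  · rfl

-- B's abbreviation parser recognises nothing outside the eight abbreviations
lemma pv_full_none (tok : String)
    (a1 : tok ≠ "N") (a2 : tok ≠ "S") (a3 : tok ≠ "E") (a4 : tok ≠ "W")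
    (a5 : tok ≠ "NE") (a6 : tok ≠ "NW") (a7 : tok ≠ "SE") (a8 : tok ≠ "SW") :
    pvFullOfAbbr tok = none := by
  unfold pvFullOfAbbr
  split_ifs with c1 c2
  · simp [pvEXP, beq_iff_eq, Ne.symm a1, Ne.symm a2, Ne.symm a3, Ne.symm a4, PySem.Dict.get?]
  · exfalso
    simp only [Bool.and_eq_true, Bool.or_eq_true_iff, beq_iff_eq] at c2
    obtain ⟨⟨-, hhead⟩, htail⟩ := c2
    have hsplit : tok.toList = tok.toList.take 1 ++ tok.toList.drop 1 := (List.take_append_drop 1 tok.toList).symm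
    have hh : tok.toList.take 1 = ['N'] ∨ tok.toList.take 1 = ['S'] := by
      rcases hhead with h | h
      · left; have := congrArg String.toList h; rwa [pv_slice1] at this
      · right; have := congrArg String.toList h; rwa [pv_slice1] at this
    have ht : tok.toList.drop 1 = ['E'] ∨ tok.toList.drop 1 = ['W'] := by
      rcases htail with h | h
      · left
        have := congrArg String.toList h
        rw [show (PySem.Str.slice tok (some 1) none).toList = tok.toList.drop 1 by simp [pysem]] at this
        exact this
      · right
        have := congrArg String.toList h
        rw [show (PySem.Str.slice tok (some 1) none).toList = tok.toList.drop 1 by simp [pysem]] at this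
        exact this
    rcases hh with h | h <;> rcases ht with h' | h'
    · exact a5 (String.toList_inj.mp (by rw [hsplit, h, h']; rfl))
    · exact a6 (String.toList_inj.mp (by rw [hsplit, h, h']; rfl))
    · exact a7 (String.toList_inj.mp (by rw [hsplit, h, h']; rfl))
    · exact a8 (String.toList_inj.mp (by rw [hsplit, h, h']; rfl))
  · rfl

lemma pv_core (l : List String) (d : List (String × String)) (last : String)
    (h : PySem.List.pyGet? l (-1) = some last) :
    deal_street_suffix_py l d = deal_street_suffix_py_alt l d := by
  by_cases hKW : last = "WEST"
  · subst hKW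
    simp only [deal_street_suffix_py, deal_street_suffix_py_alt, h, pv_get_set, Option.getD_some]; rfl
  by_cases hKE : last = "EAST"
  · subst hKE
    simp only [deal_street_suffix_py, deal_street_suffix_py_alt, h, pv_get_set, Option.getD_some]; rfl
  by_cases hKN : last = "NORTH"
  · subst hKN
    simp only [deal_street_suffix_py, deal_street_suffix_py_alt, h, pv_get_set, Option.getD_some]; rfl
  by_cases hKS : last = "SOUTH"
  · subst hKS
    simp only [deal_street_suffix_py, deal_street_suffix_py_alt, h, pv_get_set, Option.getD_some]; rfl
  by_cases hKNE : last = "NORTHEAST"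
  · subst hKNE
    simp only [deal_street_suffix_py, deal_street_suffix_py_alt, h, pv_get_set, Option.getD_some]; rfl
  by_cases hKSE : last = "SOUTHEAST"
  · subst hKSE
    simp only [deal_street_suffix_py, deal_street_suffix_py_alt, h, pv_get_set, Option.getD_some]; rfl
  by_cases hKNW : last = "NORTHWEST"
  · subst hKNW
    simp only [deal_street_suffix_py, deal_street_suffix_py_alt, h, pv_get_set, Option.getD_some]; rfl
  by_cases hKSW : last = "SOUTHWEST"
  · subst hKSW
    simp only [deal_street_suffix_py, deal_street_suffix_py_alt, h, pv_get_set, Option.getD_some]; rfl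
  by_cases hAW : last = "W"
  · subst hAW; simp only [deal_street_suffix_py, deal_street_suffix_py_alt, h]; rfl
  by_cases hAE : last = "E"
  · subst hAE; simp only [deal_street_suffix_py, deal_street_suffix_py_alt, h]; rfl
  by_cases hAN : last = "N"
  · subst hAN; simp only [deal_street_suffix_py, deal_street_suffix_py_alt, h]; rfl
  by_cases hAS : last = "S"
  · subst hAS; simp only [deal_street_suffix_py, deal_street_suffix_py_alt, h]; rfl
  by_cases hANE : last = "NE"
  · subst hANE; simp only [deal_street_suffix_py, deal_street_suffix_py_alt, h]; rfl
  by_cases hASE : last = "SE"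
  · subst hASE; simp only [deal_street_suffix_py, deal_street_suffix_py_alt, h]; rfl
  by_cases hANW : last = "NW"
  · subst hANW; simp only [deal_street_suffix_py, deal_street_suffix_py_alt, h]; rfl
  by_cases hASW : last = "SW"
  · subst hASW; simp only [deal_street_suffix_py, deal_street_suffix_py_alt, h]; rfl
  have hk : ((PySem.Dict.mk pvSuffixPairs).keys).contains last = false := by
    simp [PySem.Dict.keys, pvSuffixPairs, hKW, hKE, hKN, hKS, hKNE, hKSE, hKNW, hKSW]
  have hv : ((PySem.Dict.mk pvSuffixPairs).values).contains last = false := by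
    simp [PySem.Dict.values, pvSuffixPairs, hAW, hAE, hAN, hAS, hANE, hASE, hANW, hASW]
  have hA : pvAbbrOfFull last = none :=
    pv_abbr_none last hKN hKS hKE hKW hKNE hKNW hKSE hKSW
  have hF : pvFullOfAbbr last = none :=
    pv_full_none last hAN hAS hAE hAW hANE hANW hASE hASW
  simp only [deal_street_suffix_py, deal_street_suffix_py_alt, h, hk, hv, hA, hF,
    Bool.false_eq_true, if_false]

-- ===== VERDICT (by name: the statement is the Claim_ definition above) =====
theorem deal_street_suffix_py_spec : Claim_equal_deal_street_suffix_py := by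
  intro l d _ hpre
  unfold Spec_deal_street_suffix_py
  have hs : l.getLast?.isSome := List.getLast?_isSome.mpr hpre
  obtain ⟨x, hx⟩ := Option.isSome_iff_exists.mp hs
  exact pv_core l d x (by rw [PySem.List.pyGet?_neg_one, hx])
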